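-- pv_equiv track=rewrite | github.com/EmroyRuby/Rekrutacja-Robocik | Zadanie 2/zadanie.py | remove_wrong_moves
-- ===== SOURCE A (Python) =====
-- def remove_wrong_moves(moves):
--     wrong_moves = []
--     for i in moves:
--         if i[0] < 1 or i[1] < 1 or i[0] > 8 or i[1] > 8:
--             wrong_moves.append(i)
--     for i in wrong_moves:
--         moves.remove(i)
--
--     return moves
-- ===== SOURCE B (Python) =====
-- def remove_wrong_moves(moves):
--     moves[:] = [m for m in moves if 1 <= m[0] <= 8 and 1 <= m[1] <= 8]
--     return moves
-- ===== Notes on version B (the rewrite author's own statement) =====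
-- stated objective: simpler
-- what changed: Replaced the two-pass collect-wrong-then-remove-each-by-value strategy (each list.remove rescans the list) with a single comprehension keeping the in-range moves, spliced back in place with moves[:] = ...
import Mathlib
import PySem

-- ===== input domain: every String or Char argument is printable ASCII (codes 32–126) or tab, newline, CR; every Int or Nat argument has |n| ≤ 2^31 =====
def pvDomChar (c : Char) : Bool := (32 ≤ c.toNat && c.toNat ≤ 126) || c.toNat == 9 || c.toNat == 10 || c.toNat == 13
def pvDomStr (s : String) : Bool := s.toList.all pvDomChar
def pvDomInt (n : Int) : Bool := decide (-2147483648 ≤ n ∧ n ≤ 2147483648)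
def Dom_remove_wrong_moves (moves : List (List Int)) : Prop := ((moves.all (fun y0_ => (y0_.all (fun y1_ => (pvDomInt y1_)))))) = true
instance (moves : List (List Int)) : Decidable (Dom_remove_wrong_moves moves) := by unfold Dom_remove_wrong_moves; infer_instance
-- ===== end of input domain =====

-- B replaces A's two-pass collect-wrong-then-remove-each-by-value strategy
-- with one comprehension keeping the in-range moves, spliced in place; equivalence is
-- about the return value (both mutate and return the same list object in Python).

-- ===== PORT A =====
-- A's wrongness test 'i[0] < 1 or i[1] < 1 or i[0] > 8 or i[1] > 8' with Python's
-- short-circuit: i[1] is only read when i[0] < 1 is false.  Where Python raises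
-- IndexError (m = [], or singleton with head ≥ 1) we return false; Pre_ excludes those.
def pvBadA (m : List Int) : Bool :=
  match PySem.List.pyGet? m 0 with
  | none => false                  -- Python raises IndexError here (outside Pre_)
  | some a =>
    if a < 1 then true
    else
      match PySem.List.pyGet? m 1 with
      | none => false              -- Python raises IndexError here (outside Pre_)
      | some b => b < 1 || a > 8 || b > 8

def remove_wrong_moves (moves : List (List Int)) : List (List Int) :=
  -- first loop: wrong_moves = the bad elements in order
  let wrong_moves := moves.foldl (fun acc i => if pvBadA i then acc ++ [i] else acc) []
  -- second loop: moves.remove(i) for each (remove? never fails on Pre_; getD is unreachable)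
  wrong_moves.foldl (fun acc i => (PySem.List.remove? acc i).getD acc) moves

-- ===== PORT B =====
-- B's guard '1 <= m[0] <= 8 and 1 <= m[1] <= 8' (the chained comparison reads m[1]
-- only when 1 <= m[0] <= 8 holds).  Where Python raises we return false (outside Pre_).
def pvGoodB (m : List Int) : Bool :=
  ((PySem.List.pyGet? m 0).bind (fun a =>
      if 1 ≤ a ∧ a ≤ 8 then
        (PySem.List.pyGet? m 1).map (fun b => 1 ≤ b && b ≤ 8)
      else some false)).getD false

-- the comprehension '[m for m in moves if <good>]' is a filter; 'moves[:] = …' splices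
-- it back into the same object, whose value is returned.
def remove_wrong_moves_alt (moves : List (List Int)) : List (List Int) :=
  moves.filter pvGoodB

-- ===== PRECONDITION & SPEC =====
-- Exactly the inputs on which Python A returns: every move has ≥ 2 entries, or is a
-- singleton whose head is < 1 (then A short-circuits before the missing i[1]).
def Pre_remove_wrong_moves (moves : List (List Int)) : Prop :=
  ∀ m ∈ moves, 2 ≤ m.length ∨ (m.length = 1 ∧ m.headI < 1)
instance (moves : List (List Int)) : Decidable (Pre_remove_wrong_moves moves) := by
  unfold Pre_remove_wrong_moves; infer_instance

def pvWitness_remove_wrong_moves : List (List Int) := [[1, 2], [0, 9], [-3], [8, 8]]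

def Spec_remove_wrong_moves (moves : List (List Int)) (out : List (List Int)) : Prop :=
  out = remove_wrong_moves_alt moves
instance (moves : List (List Int)) (out : List (List Int)) : Decidable (Spec_remove_wrong_moves moves out) := by
  unfold Spec_remove_wrong_moves; infer_instance

-- ===== CLAIM (what is proved, stated in full; the proofs are below) =====
def Claim_equal_remove_wrong_moves : Prop := ∀ (moves : List (List Int)), Dom_remove_wrong_moves moves → Pre_remove_wrong_moves moves → Spec_remove_wrong_moves moves (remove_wrong_moves moves)

-- ===== LEMMAS AND PROOFS =====

-- On inputs admitted by Pre_, B's guard is the negation of A's wrongness test.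
theorem pvGood_eq_not_bad (m : List Int)
    (h : 2 ≤ m.length ∨ (m.length = 1 ∧ m.headI < 1)) : pvGoodB m = !pvBadA m := by
  rcases h with h2 | ⟨h1, hneg⟩
  · match m, h2 with
    | a :: b :: t, _ =>
      have h0 : (0:Int) ≤ (t.length:Int) + 1 := by positivity
      by_cases ha : 1 ≤ a ∧ a ≤ 8
      · simp [pvBadA, pvGoodB, PySem.List.pyGet?, PySem.List.pyIdx?, h0, ha]
        rw [Bool.eq_iff_iff]
        simp only [Bool.and_eq_true, decide_eq_true_eq, Bool.not_eq_eq_eq_not,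
          Bool.not_true, decide_eq_false_iff_not]
        omega
      · simp [pvBadA, pvGoodB, PySem.List.pyGet?, PySem.List.pyIdx?, h0, ha]
        omega
  · match m, h1 with
    | [a], _ =>
      simp only [List.headI] at hneg
      have ha : ¬ (1 ≤ a ∧ a ≤ 8) := by omega
      simp [pvBadA, pvGoodB, PySem.List.pyGet?, PySem.List.pyIdx?, ha, hneg]

-- Removing elements all different from the head commutes with cons.
theorem foldl_remove_cons (ws : List (List Int)) (x : List Int) (t : List (List Int))
    (hne : ∀ i ∈ ws, i ≠ x) :
    ws.foldl (fun acc i => (PySem.List.remove? acc i).getD acc) (x :: t)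
      = x :: ws.foldl (fun acc i => (PySem.List.remove? acc i).getD acc) t := by
  induction ws generalizing t with
  | nil => rfl
  | cons w ws ih =>
    have hwx : x ≠ w := fun h => hne w (by simp) h.symm
    have : (PySem.List.remove? (x :: t) w).getD (x :: t)
        = x :: (PySem.List.remove? t w).getD t := by
      rw [PySem.List.remove?_cons_of_ne t hwx]
      cases PySem.List.remove? t w <;> rfl
    simp only [List.foldl_cons, this]
    exact ih _ (fun i hi => hne i (by simp [hi]))

-- Removing, in order, the bad elements of xs leaves exactly the not-bad ones.
theorem remove_filter (xs : List (List Int)) :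
    (xs.filter pvBadA).foldl (fun acc i => (PySem.List.remove? acc i).getD acc) xs
      = xs.filter (fun m => !pvBadA m) := by
  induction xs with
  | nil => rfl
  | cons x t ih =>
    by_cases hx : pvBadA x = true
    · have : (x :: t).filter pvBadA = x :: t.filter pvBadA := by simp [hx]
      rw [this]
      simp only [List.foldl_cons, PySem.List.remove?_cons_self, Option.getD_some]
      rw [ih]
      simp [hx]
    · have hf : (x :: t).filter pvBadA = t.filter pvBadA := by simp [hx]
      rw [hf, foldl_remove_cons _ _ _ (fun i hi h => by
        subst h; exact hx (List.of_mem_filter hi)), ih]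
      simp [hx]

-- ===== VERDICT (by name: the statement is the Claim_ definition above) =====
theorem remove_wrong_moves_spec : Claim_equal_remove_wrong_moves := by
  intro moves _ hpre
  unfold Spec_remove_wrong_moves remove_wrong_moves remove_wrong_moves_alt
  simp only [PySem.List.foldl_append_if_eq_filter, List.nil_append]
  rw [remove_filter]
  exact List.filter_congr fun m hm => (pvGood_eq_not_bad m (hpre m hm)).symm
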